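-- pv_equiv track=rewrite | github.com/RogerDMK/ELEN4002-4012-22G04-22P72 | src/pre-processing.py | ta_count
-- ===== SOURCE A (Python) =====
-- def ta_count(matrix):
--     fire, non_fire, cloud, unknown = 0, 0, 0, 0
--     for i in range(len(matrix)):
--         for j in range(len(matrix)):
--             if matrix[i][j] == 0:
--                 non_fire += 1
--             elif matrix[i][j] == 1:
--                 fire += 1
--             elif matrix[i][j] == 2:
--                 cloud += 1
--             else:
--                 unknown += 1
--     return [fire, non_fire, cloud, unknown]
-- ===== SOURCE B (Python) =====
-- def ta_count(matrix):
--     n = len(matrix)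
--     vals = [matrix[i][j] for i in range(n) for j in range(n)]
--     fire = vals.count(1)
--     non_fire = vals.count(0)
--     cloud = vals.count(2)
--     return [fire, non_fire, cloud, n * n - fire - non_fire - cloud]
-- ===== Notes on version B (the rewrite author's own statement) =====
-- stated objective: idiomatic
-- what changed: B has no counting loop at all: it materializes the flattened list of cells once, obtains the three named counts with separate list.count passes, and derives unknown as n*n minus the other three, eliminating A's per-cell four-way branch and its four accumulators.
import Mathlib
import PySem

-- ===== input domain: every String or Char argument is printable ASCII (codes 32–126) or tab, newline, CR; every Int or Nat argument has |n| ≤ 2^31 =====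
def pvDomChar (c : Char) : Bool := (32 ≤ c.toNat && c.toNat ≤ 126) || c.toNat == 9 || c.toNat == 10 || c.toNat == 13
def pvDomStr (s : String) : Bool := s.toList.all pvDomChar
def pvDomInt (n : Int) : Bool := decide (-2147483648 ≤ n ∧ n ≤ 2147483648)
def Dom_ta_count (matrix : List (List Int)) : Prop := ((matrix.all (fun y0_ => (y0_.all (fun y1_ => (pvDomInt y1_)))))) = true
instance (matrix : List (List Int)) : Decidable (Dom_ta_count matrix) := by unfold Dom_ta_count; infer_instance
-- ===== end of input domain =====

-- B replaces A's branching count loop by flatten-once-then-three-count-passes, unknown by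
-- subtraction (idiomatic staged decomposition; same cost as A).


-- ===== PORT A =====
-- matrix[i][j] on admitted inputs (Pre_) is always in range; the .getD defaults only totalize.
def taCell (matrix : List (List Int)) (i j : Nat) : Int :=
  (PySem.List.pyGet? ((PySem.List.pyGet? matrix (Int.ofNat i)).getD []) (Int.ofNat j)).getD 0

-- the body of A's four-way if/elif chain, on state (fire, non_fire, cloud, unknown)
def taStep (st : Int × Int × Int × Int) (v : Int) : Int × Int × Int × Int :=
  if v = 0 then (st.1, st.2.1 + 1, st.2.2.1, st.2.2.2)
  else if v = 1 then (st.1 + 1, st.2.1, st.2.2.1, st.2.2.2)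
  else if v = 2 then (st.1, st.2.1, st.2.2.1 + 1, st.2.2.2)
  else (st.1, st.2.1, st.2.2.1, st.2.2.2 + 1)

def ta_count (matrix : List (List Int)) : List Int :=
  let n := matrix.length
  let st := (List.range n).foldl
    (fun st i => (List.range n).foldl (fun st j => taStep st (taCell matrix i j)) st)
    ((0 : Int), (0 : Int), (0 : Int), (0 : Int))
  [st.1, st.2.1, st.2.2.1, st.2.2.2]

-- ===== PORT B =====
def ta_count_alt (matrix : List (List Int)) : List Int :=
  let n := matrix.length
  let vals := (List.range n).flatMap (fun i => (List.range n).map (fun j => taCell matrix i j))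
  let fire : Int := PySem.List.count vals 1
  let non_fire : Int := PySem.List.count vals 0
  let cloud : Int := PySem.List.count vals 2
  [fire, non_fire, cloud, (n : Int) * n - fire - non_fire - cloud]

-- ===== PRECONDITION & SPEC =====
-- Pre_ excludes exactly the inputs where Python A raises IndexError: some row shorter than the matrix.
def Pre_ta_count (matrix : List (List Int)) : Prop :=
  ∀ row ∈ matrix, matrix.length ≤ row.length
instance (matrix : List (List Int)) : Decidable (Pre_ta_count matrix) := by
  unfold Pre_ta_count; infer_instance
def pvWitness_ta_count : List (List Int) := [[1, 0], [2, 3]]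

def Spec_ta_count (matrix : List (List Int)) (out : List Int) : Prop := out = ta_count_alt matrix
instance (matrix : List (List Int)) (out : List Int) : Decidable (Spec_ta_count matrix out) := by unfold Spec_ta_count; infer_instance

-- ===== CLAIM (what is proved, stated in full; the proofs are below) =====
def Claim_equal_ta_count : Prop := ∀ (matrix : List (List Int)), Dom_ta_count matrix → Pre_ta_count matrix → Spec_ta_count matrix (ta_count matrix)

-- ===== LEMMAS AND PROOFS =====

-- nested fold over an index grid = fold over the flattened value list
theorem foldl_flatMap_helper {α β σ : Type} (g : α → List β) (step : σ → β → σ)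
    (l : List α) (init : σ) :
    l.foldl (fun st x => (g x).foldl step st) init = (l.flatMap g).foldl step init := by
  induction l generalizing init with
  | nil => rfl
  | cons a t ih => simp [List.flatMap_cons, List.foldl_append, ih]

-- the flattened list of cell values both programs traverse
def taVals (matrix : List (List Int)) : List Int :=
  (List.range matrix.length).flatMap
    (fun i => (List.range matrix.length).map (fun j => taCell matrix i j))

theorem taVals_length (matrix : List (List Int)) :
    (taVals matrix).length = matrix.length * matrix.length := by
  simp [taVals]

-- invariant of A's fold: each component accumulates the corresponding count
theorem foldl_taStep (l : List Int) (st : Int × Int × Int × Int) :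
    l.foldl taStep st =
      (st.1 + l.count 1, st.2.1 + l.count 0, st.2.2.1 + l.count 2,
       st.2.2.2 + ((l.length : Int) - l.count 0 - l.count 1 - l.count 2)) := by
  induction l generalizing st with
  | nil => simp
  | cons v t ih =>
    rw [List.foldl_cons, ih]
    by_cases h0 : v = 0
    · simp [taStep, h0]; omega
    · by_cases h1 : v = 1
      · simp [taStep, h1]; omega
      · by_cases h2 : v = 2
        · simp [taStep, h2]; omega
        · simp [taStep, h0, h1, h2]; omega

theorem ta_count_eq_counts (matrix : List (List Int)) :
    ta_count matrix =
      [((taVals matrix).count 1 : Int), ((taVals matrix).count 0 : Int),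
       ((taVals matrix).count 2 : Int),
       ((taVals matrix).length : Int) - (taVals matrix).count 0
         - (taVals matrix).count 1 - (taVals matrix).count 2] := by
  unfold ta_count
  have h : ∀ i st, (List.range matrix.length).foldl
      (fun st j => taStep st (taCell matrix i j)) st =
      ((List.range matrix.length).map (fun j => taCell matrix i j)).foldl taStep st := by
    intro i st; rw [List.foldl_map]
  simp only [h]
  rw [foldl_flatMap_helper (fun i => (List.range matrix.length).map (fun j => taCell matrix i j))
        taStep, ← taVals]
  rw [foldl_taStep]
  simp

-- ===== VERDICT (by name: the statement is the Claim_ definition above) =====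
theorem ta_count_spec : Claim_equal_ta_count := by
  intro matrix _ _
  show ta_count matrix = ta_count_alt matrix
  rw [ta_count_eq_counts, taVals_length]
  simp only [ta_count_alt, PySem.List.count_eq, taVals]
  simp only [List.cons.injEq, and_true]
  push_cast
  ring_nf
  exact ⟨trivial, trivial, trivial, trivial⟩
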